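-- pv_equiv track=rewrite | github.com/wonyeongdeok/practice_Python | cospro/2/solution/2차/2차 2급 5_solution_code.py | solution
-- ===== SOURCE A (Python) =====
-- def solution(attack, recovery, hp):
--     count = 0
--     while(True):
--         count += 1
--         hp -= attack
--         if hp <= 0:
--             break
--         hp += recovery
--     return count
-- ===== SOURCE B (Python) =====
-- def solution(attack, recovery, hp):
--     # Closed-form: first hit kills if hp <= attack; otherwise each further
--     # round removes a net d = attack - recovery, so ceil((hp-attack)/d) more rounds.
--     if hp <= attack:
--         return 1
--     d = attack - recovery
--     return 1 + (hp - attack + d - 1) // d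
-- ===== Notes on version B (the rewrite author's own statement) =====
-- stated objective: alternative
-- what changed: Replaces the round-by-round simulation loop with closed-form ceiling arithmetic on the net damage per round.
import Mathlib
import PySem

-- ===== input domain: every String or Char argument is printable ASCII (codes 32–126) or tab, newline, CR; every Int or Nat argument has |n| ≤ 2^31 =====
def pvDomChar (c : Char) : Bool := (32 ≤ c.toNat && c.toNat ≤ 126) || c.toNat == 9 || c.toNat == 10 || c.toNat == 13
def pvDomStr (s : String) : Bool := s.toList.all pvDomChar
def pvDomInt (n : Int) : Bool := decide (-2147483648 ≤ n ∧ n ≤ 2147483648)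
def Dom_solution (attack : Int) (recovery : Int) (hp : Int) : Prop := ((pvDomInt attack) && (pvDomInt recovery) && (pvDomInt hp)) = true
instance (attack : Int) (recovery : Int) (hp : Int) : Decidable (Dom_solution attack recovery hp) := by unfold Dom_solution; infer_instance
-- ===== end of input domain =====

-- ===== PORT A =====
-- B replaces the round-by-round simulation loop with closed-form ceiling arithmetic.
-- Loop of A: count += 1; hp -= attack; break if hp <= 0; hp += recovery.  The guard
-- 'recovery < attack' only makes the recursion total; on Pre_ the diverging branch is unreachable.
def solutionLoop (attack : Int) (recovery : Int) (hp : Int) (count : Int) : Int :=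
  if hp - attack <= 0 then count + 1
  else if h : recovery < attack then solutionLoop attack recovery (hp - attack + recovery) (count + 1)
  else count + 1  -- Python diverges here; excluded by Pre_solution
termination_by (hp - attack).toNat
decreasing_by omega

def solution (attack : Int) (recovery : Int) (hp : Int) : Int :=
  solutionLoop attack recovery hp 0

-- ===== PORT B =====
def solution_alt (attack : Int) (recovery : Int) (hp : Int) : Int :=
  if hp <= attack then 1
  else 1 + PySem.Int.floordiv (hp - attack + (attack - recovery) - 1) (attack - recovery)

-- ===== PRECONDITION & SPEC =====
-- Pre_ excludes exactly the inputs where A loops forever: hp survives the first hit and the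
-- net damage per round (attack - recovery) is not positive.
def Pre_solution (attack : Int) (recovery : Int) (hp : Int) : Prop :=
  hp <= attack ∨ recovery < attack
instance (attack : Int) (recovery : Int) (hp : Int) : Decidable (Pre_solution attack recovery hp) := by
  unfold Pre_solution; infer_instance
def pvWitness_solution : Int × Int × Int := (10, 3, 100)

def Spec_solution (attack : Int) (recovery : Int) (hp : Int) (out : Int) : Prop := out = solution_alt attack recovery hp
instance (attack : Int) (recovery : Int) (hp : Int) (out : Int) : Decidable (Spec_solution attack recovery hp out) := by unfold Spec_solution; infer_instance

-- ===== CLAIM (what is proved, stated in full; the proofs are below) =====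
def Claim_equal_solution : Prop := ∀ (attack : Int) (recovery : Int) (hp : Int), Dom_solution attack recovery hp → Pre_solution attack recovery hp → Spec_solution attack recovery hp (solution attack recovery hp)

-- ===== LEMMAS AND PROOFS =====

lemma alt_step (attack recovery hp : Int) (hr : recovery < attack) (hh : attack < hp) :
    solution_alt attack recovery hp = 1 + solution_alt attack recovery (hp - attack + recovery) := by
  have hd : (0:Int) < attack - recovery := by omega
  rw [solution_alt, if_neg (by omega : ¬ hp <= attack)]
  by_cases h2 : hp - attack + recovery <= attack
  · rw [solution_alt, if_pos h2]
    have h1 : PySem.Int.floordiv (hp - attack + (attack - recovery) - 1) (attack - recovery) = 1 := by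
      rw [PySem.Int.floordiv_eq_iff_of_pos hd]; constructor <;> nlinarith
    omega
  · rw [solution_alt, if_neg h2]
    have hrw : hp - attack + (attack - recovery) - 1
        = (hp - attack + recovery - attack + (attack - recovery) - 1) + 1 * (attack - recovery) := by ring
    rw [PySem.Int.floordiv_eq_ediv_of_pos hd, PySem.Int.floordiv_eq_ediv_of_pos hd, hrw,
        Int.add_mul_ediv_right _ _ (by omega : attack - recovery ≠ 0)]
    ring

lemma solutionLoop_eq_alt (attack recovery : Int) (hr : recovery < attack) :
    ∀ n hp count, (hp - attack).toNat ≤ n →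
      solutionLoop attack recovery hp count = count + solution_alt attack recovery hp := by
  intro n
  induction n with
  | zero =>
    intro hp count hle
    rw [solutionLoop.eq_def, if_pos (by omega : hp - attack <= 0), solution_alt,
        if_pos (by omega : hp <= attack)]
  | succ n ih =>
    intro hp count hle
    rw [solutionLoop.eq_def]
    by_cases h1 : hp - attack <= 0
    · rw [if_pos h1, solution_alt, if_pos (by omega : hp <= attack)]
    · rw [if_neg h1, dif_pos hr, ih _ _ (by omega),
          alt_step attack recovery hp hr (by omega)]
      ring

-- ===== VERDICT (by name: the statement is the Claim_ definition above) =====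
theorem solution_spec : Claim_equal_solution := by
  intro attack recovery hp _ hpre
  unfold Spec_solution solution
  rcases hpre with h | h
  · rw [solutionLoop.eq_def, if_pos (by omega : hp - attack <= 0), solution_alt, if_pos h]; ring
  · rw [solutionLoop_eq_alt attack recovery h (hp - attack).toNat hp 0 (le_refl _)]; ring
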